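-- pv_equiv track=rewrite | github.com/ultimatile/cuda-x-skills | skills/cuda-webdoc-search/topology_mapper.py | _parse_query_groups
-- ===== SOURCE A (Python) =====
-- def _parse_query_groups(keywords):
--     """Split keyword tokens into OR-groups of AND-terms (fzf-subset syntax).
--
--     Handles both shell-separated tokens and quoted strings:
--       ['SVD', 'QR']        -> [['SVD', 'QR']]            # AND
--       ['SVD', '|', 'QR']   -> [['SVD'], ['QR']]           # OR
--       ['SVD | QR']          -> [['SVD'], ['QR']]           # OR (quoted)
--       ['a', 'b', '|', 'c'] -> [['a', 'b'], ['c']]         # (a AND b) OR c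
--     """
--     all_tokens = " ".join(keywords).split()
--     groups = []
--     current = []
--     for token in all_tokens:
--         if token == "|":
--             if current:
--                 groups.append(current)
--             current = []
--         else:
--             current.append(token)
--     if current:
--         groups.append(current)
--     return [g for g in groups if g]
-- ===== SOURCE B (Python) =====
-- def _parse_query_groups(keywords):
--     tokens = " ".join(keywords).split()
--     groups = []
--     i, n = 0, len(tokens)
--     while i < n:
--         if tokens[i] == "|":
--             i += 1
--         else:
--             j = i
--             while j < n and tokens[j] != "|":
--                 j += 1
--             groups.append(tokens[i:j])
--             i = j
--     return groups
-- ===== Notes on version B (the rewrite author's own statement) =====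
-- stated objective: alternative
-- what changed: Replaced A's flush-accumulator loop (current list, append-on-delimiter, trailing flush, final empty-group filter) with a two-pointer run scan that emits each maximal run of non-'|' tokens as a slice, needing no current buffer and no filter.
import Mathlib
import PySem

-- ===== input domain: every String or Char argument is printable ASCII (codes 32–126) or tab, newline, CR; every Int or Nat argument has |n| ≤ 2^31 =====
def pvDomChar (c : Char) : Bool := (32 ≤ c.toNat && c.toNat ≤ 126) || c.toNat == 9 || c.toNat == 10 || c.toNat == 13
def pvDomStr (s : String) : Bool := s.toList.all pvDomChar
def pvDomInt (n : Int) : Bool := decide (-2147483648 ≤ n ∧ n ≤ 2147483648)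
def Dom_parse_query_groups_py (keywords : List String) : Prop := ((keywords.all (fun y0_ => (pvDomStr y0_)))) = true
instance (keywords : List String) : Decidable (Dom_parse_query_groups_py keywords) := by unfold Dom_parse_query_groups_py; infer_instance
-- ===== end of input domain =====

-- B replaces A's flush-accumulator loop with a two-pointer run scan (same cost, no
-- current buffer and no trailing empty-group filter); return values proved equal.

-- ===== PORT A =====
-- A's loop body: state is (groups, current)
def pvStep (st : List (List String) × List String) (token : String) :
    List (List String) × List String :=
  if token = "|" then
    (if st.2 ≠ [] then st.1 ++ [st.2] else st.1, [])
  else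
    (st.1, st.2 ++ [token])

def parse_query_groups_py (keywords : List String) : List (List String) :=
  let all_tokens := PySem.Str.split₀ (PySem.Str.join " " keywords)
  let st := List.foldl pvStep ([], []) all_tokens
  let groups := if st.2 ≠ [] then st.1 ++ [st.2] else st.1
  List.filter (fun g => decide (g ≠ [])) groups

-- ===== PORT B =====
-- B's outer while: skip a delimiter, or emit the maximal run of non-delimiter tokens
-- (the inner scan to j and the slice tokens[i:j] are takeWhile/dropWhile).
def pvRuns : List String → List (List String)
  | [] => []
  | t :: ts =>
    if t = "|" then pvRuns ts
    else (t :: ts.takeWhile (fun x => x ≠ "|")) :: pvRuns (ts.dropWhile (fun x => x ≠ "|"))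
termination_by l => l.length
decreasing_by
  · simp
  · have := ts.length_dropWhile_le (fun x => decide (x ≠ "|"))
    simp at this ⊢; omega

def parse_query_groups_py_alt (keywords : List String) : List (List String) :=
  pvRuns (PySem.Str.split₀ (PySem.Str.join " " keywords))

-- ===== PRECONDITION & SPEC =====
def Spec_parse_query_groups_py (keywords : List String) (out : List (List String)) : Prop := out = parse_query_groups_py_alt keywords
instance (keywords : List String) (out : List (List String)) : Decidable (Spec_parse_query_groups_py keywords out) := by unfold Spec_parse_query_groups_py; infer_instance

-- ===== CLAIM (what is proved, stated in full; the proofs are below) =====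
def Claim_equal_parse_query_groups_py : Prop := ∀ (keywords : List String), Dom_parse_query_groups_py keywords → Spec_parse_query_groups_py keywords (parse_query_groups_py keywords)

-- ===== LEMMAS AND PROOFS =====

-- A's loop from ([], cur) followed by the final flush
def pvFin (cur : List String) (ts : List String) : List (List String) :=
  if (List.foldl pvStep ([], cur) ts).2 ≠ [] then
    (List.foldl pvStep ([], cur) ts).1 ++ [(List.foldl pvStep ([], cur) ts).2]
  else (List.foldl pvStep ([], cur) ts).1

theorem pvFoldl_prefix (ts : List String) : ∀ (g : List (List String)) (cur : List String),
    List.foldl pvStep (g, cur) ts =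
      (g ++ (List.foldl pvStep ([], cur) ts).1, (List.foldl pvStep ([], cur) ts).2) := by
  induction ts with
  | nil => intro g cur; simp
  | cons t ts ih =>
    intro g cur
    simp only [List.foldl_cons, pvStep]
    by_cases ht : t = "|"
    · by_cases hc : cur = []
      · simpa [ht, hc] using ih g []
      · simp only [ht, hc, ne_eq, not_false_eq_true, if_true, ite_true, reduceIte,
          List.nil_append]
        rw [ih (g ++ [cur]) [], ih [cur] []]
        simp
    · simpa [ht] using ih g (cur ++ [t])

theorem pvFin_cons (cur : List String) (t : String) (ts : List String) :
    pvFin cur (t :: ts) =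
      if t = "|" then (if cur ≠ [] then cur :: pvFin [] ts else pvFin [] ts)
      else pvFin (cur ++ [t]) ts := by
  by_cases ht : t = "|"
  · by_cases hc : cur = []
    · simp [pvFin, pvStep, ht, hc]
    · simp only [pvFin, List.foldl_cons, pvStep, ht, hc, ne_eq, not_false_eq_true,
        if_true, ite_true, reduceIte, List.nil_append]
      rw [pvFoldl_prefix]
      by_cases hB : (List.foldl pvStep ([], []) ts).2 = [] <;> simp [hB, hc]
  · simp [pvFin, pvStep, ht]

theorem pvFin_eq_runs (ts : List String) : ∀ cur : List String,
    pvFin cur ts =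
      if cur = [] then pvRuns ts
      else (cur ++ ts.takeWhile (fun x => x ≠ "|")) :: pvRuns (ts.dropWhile (fun x => x ≠ "|")) := by
  induction ts with
  | nil =>
    intro cur
    by_cases hc : cur = [] <;> simp [pvFin, pvRuns, hc]
  | cons t ts ih =>
    intro cur
    rw [pvFin_cons]
    by_cases ht : t = "|"
    · by_cases hc : cur = [] <;>
        simp [ht, hc, ih [], pvRuns, List.takeWhile, List.dropWhile]
    · rw [if_neg ht, ih (cur ++ [t])]
      by_cases hc : cur = [] <;> simp [ht, hc, pvRuns]

theorem pvFin_nil_eq (ts : List String) : pvFin [] ts = pvRuns ts := by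
  simpa using pvFin_eq_runs ts []

theorem pvRuns_ne_nil (ts : List String) : ∀ g ∈ pvRuns ts, g ≠ [] := by
  induction ts using pvRuns.induct <;> simp_all [pvRuns]

theorem pvRuns_filter (ts : List String) :
    List.filter (fun g => decide (g ≠ [])) (pvRuns ts) = pvRuns ts :=
  List.filter_eq_self.mpr (by intro a ha; simpa using pvRuns_ne_nil ts a ha)

-- ===== VERDICT (by name: the statement is the Claim_ definition above) =====
theorem parse_query_groups_py_spec : Claim_equal_parse_query_groups_py := by
  intro keywords _
  show parse_query_groups_py keywords = parse_query_groups_py_alt keywords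
  calc parse_query_groups_py keywords
      = List.filter (fun g => decide (g ≠ []))
          (pvFin [] (PySem.Str.split₀ (PySem.Str.join " " keywords))) := rfl
    _ = pvRuns (PySem.Str.split₀ (PySem.Str.join " " keywords)) := by
          rw [pvFin_nil_eq, pvRuns_filter]
    _ = parse_query_groups_py_alt keywords := rfl
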